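-- pv_equiv track=rewrite | github.com/naufal-web/python-apriori-lab | apriori.py | items_binary_list_generator
-- ===== SOURCE A (Python) =====
-- def items_binary_list_generator(nested_list):  # Algorithm Complexity :: O(3n)
--     binaries = []
--     for i in range(min(map(len, nested_list))):  # O(n)
--         ls = list(lst[i] for lst in nested_list)  # O(1)
--         if ls == [1 for ele in range(len(nested_list))]:
--             binaries.append(1)  # O(1)
--         else:
--             binaries.append(0)  # O(1)
--
--     return binaries
-- ===== SOURCE B (Python) =====
-- def items_binary_list_generator(nested_list):
--     n = min(len(row) for row in nested_list)
--     binaries = [1] * n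
--     for row in nested_list:
--         for i in range(n):
--             if row[i] != 1:
--                 binaries[i] = 0
--     return binaries
-- ===== Notes on version B (the rewrite author's own statement) =====
-- stated objective: alternative
-- what changed: Row-major single pass that updates a running [1]*n flag array in place (binaries[i]=0 when row[i]!=1), instead of A's column-major loop that materialises each column list and compares it against a freshly built all-ones list.
import Mathlib
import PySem

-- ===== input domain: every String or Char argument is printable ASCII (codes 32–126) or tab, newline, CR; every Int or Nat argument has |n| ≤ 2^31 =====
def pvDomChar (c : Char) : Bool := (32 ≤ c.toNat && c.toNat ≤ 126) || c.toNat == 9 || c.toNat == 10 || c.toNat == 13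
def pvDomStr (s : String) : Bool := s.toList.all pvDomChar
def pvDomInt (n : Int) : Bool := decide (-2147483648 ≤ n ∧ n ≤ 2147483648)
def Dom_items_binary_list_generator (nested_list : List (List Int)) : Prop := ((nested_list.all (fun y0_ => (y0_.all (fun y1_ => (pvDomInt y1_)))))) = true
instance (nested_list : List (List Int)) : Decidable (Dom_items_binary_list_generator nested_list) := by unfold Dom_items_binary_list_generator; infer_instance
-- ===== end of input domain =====

-- B differs from A by decomposition only (row-major flag-array pass vs A's column
-- rebuild-and-compare); same cost, equivalence of the return value on nonempty input.

-- ===== PORT A =====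
-- lst[i] is always in range here (i < min of the lengths), so pyGetD is exact
def items_binary_list_generator (nested_list : List (List Int)) : List Int :=
  match PySem.List.min? (nested_list.map (fun lst => (lst.length : Int))) (fun x => x) with
  | none => []   -- Python: min() of empty → ValueError; excluded by Pre_
  | some m =>
    (PySem.List.pyRange 0 m 1).foldl (fun binaries i =>
      let ls := nested_list.map (fun lst => PySem.List.pyGetD lst i 0)
      if ls = (PySem.List.pyRange 0 (nested_list.length : Int) 1).map (fun _ => (1 : Int))
      then binaries ++ [1]
      else binaries ++ [0]) []

-- ===== PORT B =====
-- row[i] and binaries[i] are always in range (i < min of the lengths), so pyGetD/pySetD are exact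
def items_binary_list_generator_alt (nested_list : List (List Int)) : List Int :=
  match PySem.List.min? (nested_list.map (fun row => (row.length : Int))) (fun x => x) with
  | none => []   -- Python: min() of empty generator → ValueError; excluded by Pre_
  | some m =>
    nested_list.foldl (fun binaries row =>
      (PySem.List.pyRange 0 m 1).foldl (fun b i =>
        if PySem.List.pyGetD row i 0 ≠ 1 then PySem.List.pySetD b i 0 else b) binaries)
      (List.replicate m.toNat 1)

-- ===== PRECONDITION & SPEC =====
-- Pre_ excludes only the empty list, on which Python A (and B) raise ValueError (min of an empty sequence).
def Pre_items_binary_list_generator (nested_list : List (List Int)) : Prop := nested_list ≠ []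
instance (nested_list : List (List Int)) : Decidable (Pre_items_binary_list_generator nested_list) := by unfold Pre_items_binary_list_generator; infer_instance
def pvWitness_items_binary_list_generator : List (List Int) := [[1, 2], [1, 1]]

def Spec_items_binary_list_generator (nested_list : List (List Int)) (out : List Int) : Prop := out = items_binary_list_generator_alt nested_list
instance (nested_list : List (List Int)) (out : List Int) : Decidable (Spec_items_binary_list_generator nested_list out) := by unfold Spec_items_binary_list_generator; infer_instance

-- ===== CLAIM (what is proved, stated in full; the proofs are below) =====
def Claim_equal_items_binary_list_generator : Prop := ∀ (nested_list : List (List Int)), Dom_items_binary_list_generator nested_list → Pre_items_binary_list_generator nested_list → Spec_items_binary_list_generator nested_list (items_binary_list_generator nested_list)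

-- ===== LEMMAS AND PROOFS =====

-- B's inner loop (over column indices, one row), after pyRange/pyGetD/pySetD are bridged to
-- Nat indexing.
def innerStep (row : List Int) : List Int → Nat → List Int :=
  fun b k => if row.getD k 0 ≠ 1 then b.set k 0 else b

theorem innerStep_length (row : List Int) (l : List Nat) (b : List Int) :
    ((l.foldl (innerStep row) b)).length = b.length := by
  induction l generalizing b with
  | nil => rfl
  | cons k t ih =>
    simp only [List.foldl_cons]
    rw [ih]
    unfold innerStep
    split <;> simp

-- setting position j to 0 then reading j only depends on the length
theorem set_get_self (b : List Int) (j : Nat) :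
    (b.set j 0)[j]? = if j < b.length then some 0 else none := by
  rw [List.getElem?_set]; simp

theorem inner_get (row : List Int) (n : Nat) (b : List Int) (j : Nat) :
    ((List.range n).foldl (innerStep row) b)[j]? =
      if j < n ∧ row.getD j 0 ≠ 1 then (b.set j 0)[j]? else b[j]? := by
  induction n generalizing j with
  | zero => simp
  | succ n ih =>
    rw [List.range_succ, List.foldl_append]
    simp only [List.foldl_cons, List.foldl_nil, innerStep]
    by_cases hn : row.getD n 0 ≠ 1
    · rw [if_pos hn, List.getElem?_set]
      by_cases hjn : n = j
      · subst hjn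
        rw [if_pos rfl, innerStep_length,
          if_pos (show n < n + 1 ∧ row.getD n 0 ≠ 1 from ⟨Nat.lt_succ_self n, hn⟩), set_get_self]
      · rw [if_neg hjn, ih]
        have hiff : (j < n + 1) ↔ (j < n) := by omega
        simp only [hiff]
    · rw [if_neg hn, ih]
      by_cases hjn : j = n
      · subst hjn
        have h1 : row.getD j 0 = 1 := by simpa using hn
        rw [if_neg (fun h => absurd h.1 (lt_irrefl j)), if_neg (fun h => h.2 h1)]
      · have hiff : (j < n + 1) ↔ (j < n) := by omega
        simp only [hiff]

theorem outer_get (rows : List (List Int)) (n : Nat) (b : List Int) (j : Nat) :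
    ((rows.foldl (fun b row => (List.range n).foldl (innerStep row) b) b))[j]? =
      if j < n ∧ ∃ row ∈ rows, row.getD j 0 ≠ 1 then (b.set j 0)[j]? else b[j]? := by
  induction rows generalizing b with
  | nil => simp
  | cons r rs ih =>
    simp only [List.foldl_cons]
    rw [ih]
    have hlen : ((List.range n).foldl (innerStep r) b).length = b.length :=
      innerStep_length r (List.range n) b
    by_cases h2 : j < n ∧ ∃ row ∈ rs, row.getD j 0 ≠ 1
    · have h1 : j < n ∧ ∃ row ∈ r :: rs, row.getD j 0 ≠ 1 :=
        ⟨h2.1, h2.2.choose, List.mem_cons_of_mem _ h2.2.choose_spec.1, h2.2.choose_spec.2⟩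
      rw [if_pos h2, if_pos h1, set_get_self, set_get_self, hlen]
    · rw [if_neg h2, inner_get]
      by_cases hr : j < n ∧ r.getD j 0 ≠ 1
      · have h1 : j < n ∧ ∃ row ∈ r :: rs, row.getD j 0 ≠ 1 :=
          ⟨hr.1, r, List.mem_cons_self, hr.2⟩
        rw [if_pos hr, if_pos h1]
      · have h1 : ¬ (j < n ∧ ∃ row ∈ r :: rs, row.getD j 0 ≠ 1) := by
          rintro ⟨hj, row, hmem, hne⟩
          rcases List.mem_cons.1 hmem with h | h
          · exact hr ⟨hj, h ▸ hne⟩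
          · exact h2 ⟨hj, row, h, hne⟩
        rw [if_neg hr, if_neg h1]

theorem map_range_get (g : Nat → Int) (n j : Nat) (hj : j < n) :
    ((List.range n).map g)[j]? = some (g j) := by
  simp [hj]

-- the common pointwise value of both programs
theorem alt_eq_map (nested_list : List (List Int)) (m : Int)
    (hm : PySem.List.min? (nested_list.map (fun lst => (lst.length : Int))) (fun x => x) = some m) :
    items_binary_list_generator_alt nested_list =
      (List.range m.toNat).map
        (fun k => if ∀ row ∈ nested_list, row.getD k 0 = 1 then (1 : Int) else 0) := by
  unfold items_binary_list_generator_alt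
  rw [hm]
  dsimp only
  have hout : (nested_list.foldl (fun binaries row =>
      (PySem.List.pyRange 0 m 1).foldl (fun b i =>
        if PySem.List.pyGetD row i 0 ≠ 1 then PySem.List.pySetD b i 0 else b) binaries)
      (List.replicate m.toNat 1)) =
      nested_list.foldl (fun b row => (List.range m.toNat).foldl (innerStep row) b)
        (List.replicate m.toNat 1) := by
    apply PySem.List.foldl_congr_mem
    intro b row _
    rw [PySem.List.pyRange_zero m, List.foldl_map]
    apply PySem.List.foldl_congr_mem
    intro acc k _
    simp [innerStep, PySem.List.pyGetD_natCast, PySem.List.pySetD_natCast]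
  rw [hout]
  apply List.ext_getElem?
  intro j
  rw [outer_get]
  by_cases hj : j < m.toNat
  · by_cases hall : ∀ row ∈ nested_list, row.getD j 0 = 1
    · have hne : ¬ (j < m.toNat ∧ ∃ row ∈ nested_list, row.getD j 0 ≠ 1) := by
        rintro ⟨_, row, hmem, hrow⟩; exact hrow (hall row hmem)
      rw [if_neg hne, map_range_get _ _ _ hj, if_pos hall, List.getElem?_replicate, if_pos hj]
    · have hex : ∃ row ∈ nested_list, row.getD j 0 ≠ 1 := by
        by_contra hc
        exact hall fun row hrow => by
          by_contra hne1
          exact hc ⟨row, hrow, hne1⟩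
      rw [if_pos ⟨hj, hex⟩, set_get_self, List.length_replicate, if_pos hj,
        map_range_get _ _ _ hj, if_neg hall]
  · have hne : ¬ (j < m.toNat ∧ ∃ row ∈ nested_list, row.getD j 0 ≠ 1) := by
      rintro ⟨h, _⟩; exact hj h
    rw [if_neg hne]
    simp [hj]

theorem a_eq_map (nested_list : List (List Int)) (m : Int)
    (hm : PySem.List.min? (nested_list.map (fun lst => (lst.length : Int))) (fun x => x) = some m) :
    items_binary_list_generator nested_list =
      (List.range m.toNat).map
        (fun k => if ∀ row ∈ nested_list, row.getD k 0 = 1 then (1 : Int) else 0) := by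
  unfold items_binary_list_generator
  rw [hm]
  dsimp only
  -- the all-ones comparison list is replicate
  have hones : (PySem.List.pyRange 0 (nested_list.length : Int) 1).map (fun _ => (1 : Int)) =
      List.replicate nested_list.length 1 := by
    rw [PySem.List.pyRange_zero_nat]; simp [Function.comp_def]
  rw [PySem.List.pyRange_zero m, List.foldl_map]
  have hstep : ((List.range m.toNat).foldl (fun binaries k =>
      let ls := nested_list.map (fun lst => PySem.List.pyGetD lst ((k : Nat) : Int) 0)
      if ls = (PySem.List.pyRange 0 (nested_list.length : Int) 1).map (fun _ => (1 : Int))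
      then binaries ++ [1] else binaries ++ [0]) ([] : List Int)) =
      (List.range m.toNat).foldl (fun binaries k =>
        binaries ++ [if ∀ row ∈ nested_list, row.getD k 0 = 1 then (1 : Int) else 0]) [] := by
    apply PySem.List.foldl_congr_mem
    intro binaries k _
    simp only [hones]
    have hcmp : (nested_list.map (fun lst => PySem.List.pyGetD lst ((k : Int)) 0) =
        List.replicate nested_list.length 1) ↔ ∀ row ∈ nested_list, row.getD k 0 = 1 := by
      rw [show (List.replicate nested_list.length (1 : Int)) =
            List.replicate
              (nested_list.map (fun lst => PySem.List.pyGetD lst ((k : Int)) 0)).length 1 by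
            simp]
      rw [List.eq_replicate_iff]
      constructor
      · rintro ⟨-, h⟩ row hrow
        simpa [PySem.List.pyGetD_natCast] using h _ (List.mem_map.2 ⟨row, hrow, rfl⟩)
      · intro h
        refine ⟨rfl, ?_⟩
        rintro b hb
        rcases List.mem_map.1 hb with ⟨row, hrow, rfl⟩
        simpa [PySem.List.pyGetD_natCast] using h row hrow
    by_cases h : ∀ row ∈ nested_list, row.getD k 0 = 1
    · rw [if_pos (hcmp.2 h), if_pos h]
    · rw [if_neg (fun hc => h (hcmp.1 hc)), if_neg h]
  rw [hstep, PySem.List.foldl_append_singleton_eq_map]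
  simp

-- ===== VERDICT (by name: the statement is the Claim_ definition above) =====
theorem items_binary_list_generator_spec : Claim_equal_items_binary_list_generator := by
  intro nested_list _ hpre
  unfold Spec_items_binary_list_generator
  cases hm : PySem.List.min? (nested_list.map (fun lst => (lst.length : Int))) (fun x => x) with
  | none =>
    exact absurd ((PySem.List.min?_eq_none_iff _ _).1 hm)
      (by simp [Pre_items_binary_list_generator] at hpre ⊢; exact hpre)
  | some m =>
    rw [a_eq_map nested_list m hm, alt_eq_map nested_list m hm]
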